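-- pv_equiv track=rewrite | github.com/raeez/chiral-bar-cobar | compute/lib/mock_modular_admissible_engine.py | shadow_theta_function
-- ===== SOURCE A (Python) =====
-- from typing import Any, Dict, List, Optional, Sequence, Tuple
--
-- def shadow_theta_function(p: int, q: int, r: int = 1, s: int = 1,
--                            nmax: int = 30) -> List[int]:
--     r"""Compute the unary theta shadow for the admissible character chi_{r,s}.
--
--     The shadow (in Zwegers' sense) of the mock modular form chi_{r,s} is:
--
--     g_{r,s}(tau) = sum_{n in Z} (2pqn + ps - qr) * q^{(2pqn + ps - qr)^2/(4pq)}
--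
--     This is a unary theta function of weight 3/2.
--
--     Parameters:
--         p, q: admissible level parameters (k = p/q - 2)
--         r, s: module labels (1 <= r <= p-1, 1 <= s <= q)
--         nmax: maximum q-power
--
--     Returns:
--         List of integer coefficients: g_{r,s} = sum a_n q^n.
--     """
--     m = p * q
--     ell = p * s - q * r  # the "index" of the theta function
--
--     coeffs = [0] * (nmax + 1)
--     for n in range(-nmax, nmax + 1):
--         val = 2 * m * n + ell
--         exp_num = val * val
--         exp_denom = 4 * m
--         if exp_denom != 0 and exp_num % exp_denom == 0:
--             exp = exp_num // exp_denom
--             if 0 <= exp <= nmax: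
--                 coeffs[exp] += val  # weight by (2mn + ell)
--     return coeffs
-- ===== SOURCE B (Python) =====
-- def _isqrt(n):
--     # floor square root for n >= 0, Newton's method
--     if n == 0:
--         return 0
--     x = n
--     y = (x + 1) // 2
--     while y < x:
--         x = y
--         y = (x + n // x) // 2
--     return x
--
--
-- def shadow_theta_function(p, q, r=1, s=1, nmax=30):
--     m = p * q
--     ell = p * s - q * r
--     if m <= 0 or nmax < 0:
--         # m = 0: no term qualifies; m < 0: only val = 0 could, adding 0.
--         return [0] * (nmax + 1)
--
--     def coeff(e):
--         # a_e = sum of the (at most two) values w with w*w = 4*m*e that are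
--         # hit as w = 2*m*n + ell for some n in [-nmax, nmax].
--         t = 4 * m * e
--         v = _isqrt(t)
--         if v * v != t:
--             return 0
--         total = 0
--         for w in ((v, -v) if v > 0 else (0,)):
--             d = w - ell
--             if d % (2 * m) == 0 and -nmax <= d // (2 * m) <= nmax:
--                 total += w
--         return total
--
--     return [coeff(e) for e in range(nmax + 1)]
-- ===== Notes on version B (the rewrite author's own statement) =====
-- stated objective: alternative
-- what changed: B inverts the computation: instead of scanning all n in [-nmax, nmax] and scattering val into bucket val^2/(4m), it computes each output coefficient a_e directly by a closed-form test on e (is 4*m*e a perfect square, via an integer sqrt; if v^2 = 4*m*e, add whichever of +v/-v lies on the residue class ell mod 2m within the n-window), returning all zeros outright when m <= 0.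
import Mathlib
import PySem

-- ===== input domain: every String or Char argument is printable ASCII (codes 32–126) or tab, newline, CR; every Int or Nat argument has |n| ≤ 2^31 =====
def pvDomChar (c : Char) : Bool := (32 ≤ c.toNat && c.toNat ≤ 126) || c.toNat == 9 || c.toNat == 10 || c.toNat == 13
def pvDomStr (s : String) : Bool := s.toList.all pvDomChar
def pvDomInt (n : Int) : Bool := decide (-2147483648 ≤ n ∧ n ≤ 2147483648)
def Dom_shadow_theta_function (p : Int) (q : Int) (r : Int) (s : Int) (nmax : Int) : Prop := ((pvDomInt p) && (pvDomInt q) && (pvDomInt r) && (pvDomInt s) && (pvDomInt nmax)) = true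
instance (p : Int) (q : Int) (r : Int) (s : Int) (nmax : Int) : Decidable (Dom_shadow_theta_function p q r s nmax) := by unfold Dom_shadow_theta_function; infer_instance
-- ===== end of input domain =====

-- B inverts A's scatter loop: instead of scanning n in [-nmax, nmax] and bucketing
-- val = 2mn+ell into index val^2/(4m), it computes each coefficient a_e directly by a
-- per-exponent test (is 4*m*e a perfect square v^2; if so, add whichever of ±v is hit
-- by some n in the window); objective: alternative (same cost, different algorithm).

-- ===== PORT A =====
def shadow_theta_function (p : Int) (q : Int) (r : Int) (s : Int) (nmax : Int) : List Int :=
  let m := p * q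
  let ell := p * s - q * r
  let coeffs : List Int := List.replicate (nmax + 1).toNat 0
  (PySem.List.pyRange (-nmax) (nmax + 1) 1).foldl (fun cs n =>
    let val := 2 * m * n + ell
    let exp_num := val * val
    let exp_denom := 4 * m
    if exp_denom ≠ 0 ∧ PySem.Int.mod exp_num exp_denom = 0 then
      let e := PySem.Int.floordiv exp_num exp_denom
      if 0 ≤ e ∧ e ≤ nmax then cs.modify e.toNat (· + val) else cs
    else cs) coeffs

-- ===== PORT B =====
-- Newton integer-sqrt loop of Source B's _isqrt; the extra `0 ≤ y` in the guard is a
-- termination guard only: on every call reached from pvIsqrt with n ≥ 1 the iterate y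
-- is nonnegative, so the guard coincides with Python's `y < x` there (exact on n ≥ 0).
def pvIsqrtGo (nn : Int) (x : Int) (y : Int) : Int :=
  if _h : 0 ≤ y ∧ y < x then
    pvIsqrtGo nn y (PySem.Int.floordiv (y + PySem.Int.floordiv nn y) 2)
  else x
termination_by x.toNat
decreasing_by omega

def pvIsqrt (n : Int) : Int :=
  if n = 0 then 0 else pvIsqrtGo n n (PySem.Int.floordiv (n + 1) 2)

-- Source B's inner `coeff(e)`
def pvCoeff (m : Int) (ell : Int) (nmax : Int) (e : Int) : Int :=
  let t := 4 * m * e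
  let v := pvIsqrt t
  if v * v ≠ t then 0
  else
    (if v > 0 then [v, -v] else [0]).foldl (fun total w =>
      let d := w - ell
      if PySem.Int.mod d (2 * m) = 0 ∧ -nmax ≤ PySem.Int.floordiv d (2 * m) ∧
          PySem.Int.floordiv d (2 * m) ≤ nmax
      then total + w else total) 0

def shadow_theta_function_alt (p : Int) (q : Int) (r : Int) (s : Int) (nmax : Int) : List Int :=
  let m := p * q
  let ell := p * s - q * r
  if m ≤ 0 ∨ nmax < 0 then List.replicate (nmax + 1).toNat 0
  else (PySem.List.pyRange 0 (nmax + 1) 1).map (pvCoeff m ell nmax)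

-- ===== PRECONDITION & SPEC =====
def Spec_shadow_theta_function (p : Int) (q : Int) (r : Int) (s : Int) (nmax : Int) (out : List Int) : Prop := out = shadow_theta_function_alt p q r s nmax
instance (p : Int) (q : Int) (r : Int) (s : Int) (nmax : Int) (out : List Int) : Decidable (Spec_shadow_theta_function p q r s nmax out) := by unfold Spec_shadow_theta_function; infer_instance

-- ===== CLAIM (what is proved, stated in full; the proofs are below) =====
def Claim_equal_shadow_theta_function : Prop := ∀ (p : Int) (q : Int) (r : Int) (s : Int) (nmax : Int), Dom_shadow_theta_function p q r s nmax → Spec_shadow_theta_function p q r s nmax (shadow_theta_function p q r s nmax)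

-- ===== LEMMAS AND PROOFS =====

-- A's loop body, named for the proofs (definitionally the lambda above).
def pvBodyA (m ell nmax : Int) (cs : List Int) (n : Int) : List Int :=
  let val := 2 * m * n + ell
  let exp_num := val * val
  let exp_denom := 4 * m
  if exp_denom ≠ 0 ∧ PySem.Int.mod exp_num exp_denom = 0 then
    let e := PySem.Int.floordiv exp_num exp_denom
    if 0 ≤ e ∧ e ≤ nmax then cs.modify e.toNat (· + val) else cs
  else cs

-- the contribution of loop iteration n to coefficient j (for m ≥ 1)
def pvContrib (m ell : Int) (j : Int) (n : Int) : Int :=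
  if (2 * m * n + ell) * (2 * m * n + ell) = 4 * m * j then 2 * m * n + ell else 0

lemma pvFoldlId {α β : Type} (l : List α) (f : β → α → β) (init : β)
    (h : ∀ acc, ∀ x ∈ l, f acc x = acc) : l.foldl f init = init := by
  induction l generalizing init with
  | nil => rfl
  | cons a l ih =>
    rw [List.foldl_cons, h init a (List.mem_cons_self), ih]
    intro acc x hx; exact h acc x (List.mem_cons_of_mem a hx)

-- Newton iteration invariant: starting from any x ≥ 1 with nn < (x+1)^2 the loop
-- returns the floor square root of nn (for nn ≥ 1).
theorem pvIsqrtGo_spec : ∀ (k : Nat) (nn x : Int), x.toNat = k → 1 ≤ nn → 1 ≤ x →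
    nn < (x + 1) * (x + 1) →
    0 ≤ pvIsqrtGo nn x (PySem.Int.floordiv (x + PySem.Int.floordiv nn x) 2) ∧
    (pvIsqrtGo nn x (PySem.Int.floordiv (x + PySem.Int.floordiv nn x) 2)) *
      (pvIsqrtGo nn x (PySem.Int.floordiv (x + PySem.Int.floordiv nn x) 2)) ≤ nn ∧
    nn < (pvIsqrtGo nn x (PySem.Int.floordiv (x + PySem.Int.floordiv nn x) 2) + 1) *
      (pvIsqrtGo nn x (PySem.Int.floordiv (x + PySem.Int.floordiv nn x) 2) + 1) := by
  intro k
  induction k using Nat.strong_induction_on with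
  | _ k ih =>
    intro nn x hk hnn hx hub
    have hxpos : (0:Int) < x := by omega
    have hd1 := PySem.Int.floordiv_mul_add_mod nn x
    have hm1 : 0 ≤ PySem.Int.mod nn x := PySem.Int.mod_nonneg nn hxpos
    have hm1' : PySem.Int.mod nn x < x := PySem.Int.mod_lt nn hxpos
    generalize hT : PySem.Int.floordiv nn x = t at *
    generalize hR1 : PySem.Int.mod nn x = r1 at *
    have hd2 := PySem.Int.floordiv_mul_add_mod (x + t) 2
    have hm2 : 0 ≤ PySem.Int.mod (x + t) 2 := PySem.Int.mod_nonneg _ (by norm_num)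
    have hm2' : PySem.Int.mod (x + t) 2 < 2 := PySem.Int.mod_lt _ (by norm_num)
    generalize hY : PySem.Int.floordiv (x + t) 2 = y at *
    generalize hR2 : PySem.Int.mod (x + t) 2 = r2 at *
    have htpos : 0 ≤ t := by nlinarith
    have hy1 : 1 ≤ y := by
      rcases lt_or_ge x 2 with h2 | h2
      · have hx1 : x = 1 := by omega
        subst hx1
        rw [mul_one] at hd1
        omega
      · omega
    have h3 : x + t + 1 ≤ 2 * y + 2 := by omega
    have h4 : (x + t + 1) * (x + t + 1) ≤ (2 * y + 2) * (2 * y + 2) :=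
      mul_self_le_mul_self (by omega) h3
    have hyub : nn < (y + 1) * (y + 1) := by nlinarith [sq_nonneg (x - t - 1)]
    rw [pvIsqrtGo]
    by_cases hcond : 0 ≤ y ∧ y < x
    · simp only [hcond]
      exact ih y.toNat (by omega) nn y rfl hnn hy1 hyub
    · simp only [hcond, dif_neg, not_false_eq_true]
      have hxy : x ≤ y := by omega
      have hxt : x ≤ t := by omega
      have hxx : x * x ≤ nn := by nlinarith
      exact ⟨by omega, hxx, hub⟩

theorem pvIsqrt_spec (n : Int) (hn : 0 ≤ n) :
    0 ≤ pvIsqrt n ∧ pvIsqrt n * pvIsqrt n ≤ n ∧ n < (pvIsqrt n + 1) * (pvIsqrt n + 1) := by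
  rcases eq_or_lt_of_le hn with h0 | h1
  · have hz : pvIsqrt n = 0 := by rw [pvIsqrt, if_pos h0.symm]
    rw [hz]; omega
  · have hne : n ≠ 0 := by omega
    have hdd : PySem.Int.floordiv n n = 1 := by
      rw [PySem.Int.floordiv_eq_iff_of_pos h1]
      constructor <;> nlinarith
    have := pvIsqrtGo_spec n.toNat n n rfl (by omega) (by omega) (by nlinarith)
    rw [hdd] at this
    rw [pvIsqrt, if_neg hne]
    exact this

lemma pvBodyA_zero (ell nmax : Int) (cs : List Int) (n : Int) :
    pvBodyA 0 ell nmax cs n = cs := by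
  simp [pvBodyA]

lemma pvBodyA_neg (m ell nmax : Int) (hm : m < 0) (cs : List Int) (n : Int) :
    pvBodyA m ell nmax cs n = cs := by
  simp only [pvBodyA]
  split_ifs with hg he
  · have hd := PySem.Int.floordiv_mul_add_mod ((2*m*n+ell)*(2*m*n+ell)) (4*m)
    rw [hg.2, add_zero] at hd
    have hsq : 0 ≤ (2*m*n+ell)*(2*m*n+ell) := mul_self_nonneg _
    have hv0 : 2*m*n+ell = 0 := by nlinarith [he.1]
    rw [hv0]
    have hid : (fun a : Int => a + 0) = id := by funext a; simp
    rw [hid, List.modify_id]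
  · rfl
  · rfl

-- for m ≥ 1: the index-j view of A's loop body
lemma pvBodyA_get (m ell nmax : Int) (hm : 1 ≤ m) (cs : List Int) (n : Int) (j : Nat)
    (hj : (j : Int) ≤ nmax) :
    (pvBodyA m ell nmax cs n)[j]? = cs[j]?.map (· + pvContrib m ell (j : Int) n) := by
  have h4 : (0:Int) < 4 * m := by omega
  simp only [pvBodyA, pvContrib]
  by_cases hmod : PySem.Int.mod ((2*m*n+ell)*(2*m*n+ell)) (4*m) = 0
  · have hd := PySem.Int.floordiv_mul_add_mod ((2*m*n+ell)*(2*m*n+ell)) (4*m)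
    rw [hmod, add_zero] at hd
    have hsq : 0 ≤ (2*m*n+ell)*(2*m*n+ell) := mul_self_nonneg _
    have he0 : 0 ≤ PySem.Int.floordiv ((2*m*n+ell)*(2*m*n+ell)) (4*m) := by nlinarith
    set e := PySem.Int.floordiv ((2*m*n+ell)*(2*m*n+ell)) (4*m) with hedef
    have hiff : (2*m*n+ell)*(2*m*n+ell) = 4*m*(j:Int) ↔ e = (j:Int) := by
      constructor
      · intro hh; nlinarith
      · intro hh; rw [← hd, hh]; ring
    by_cases hej : e = (j:Int)
    · have hle : e ≤ nmax := by omega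
      have hetn : e.toNat = j := by omega
      rw [if_pos ⟨by omega, hmod⟩, if_pos ⟨he0, hle⟩, hetn, List.getElem?_modify,
        if_pos (hiff.mpr hej)]
      cases cs[j]? <;> simp
    · have hne : (2*m*n+ell)*(2*m*n+ell) ≠ 4*m*(j:Int) := fun hh => hej (hiff.mp hh)
      rw [if_pos ⟨by omega, hmod⟩, if_neg hne]
      split_ifs with hrange
      · rw [List.getElem?_modify]
        have hetn : e.toNat ≠ j := by omega
        cases cs[j]? <;> simp [hetn]
      · cases cs[j]? <;> simp
  · have hne : (2*m*n+ell)*(2*m*n+ell) ≠ 4*m*(j:Int) := by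
      intro hh
      apply hmod
      rw [hh, PySem.Int.mod_eq_zero_iff_dvd]
      exact ⟨j, rfl⟩
    rw [if_neg (by simp [hmod]), if_neg hne]
    cases cs[j]? <;> simp

-- for m ≥ 1: the index-j view of A's whole loop
lemma pvFoldA_get (m ell nmax : Int) (hm : 1 ≤ m) (L : List Int) (cs : List Int) (j : Nat)
    (hj : (j : Int) ≤ nmax) :
    (L.foldl (pvBodyA m ell nmax) cs)[j]? =
      cs[j]?.map (· + (L.map (pvContrib m ell (j : Int))).sum) := by
  induction L generalizing cs with
  | nil => simp
  | cons n L ih =>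
    rw [List.foldl_cons, ih, pvBodyA_get m ell nmax hm cs n j hj]
    cases cs[j]? <;> simp [add_assoc]

lemma pvFoldA_length (m ell nmax : Int) (L : List Int) (cs : List Int) :
    (L.foldl (pvBodyA m ell nmax) cs).length = cs.length := by
  induction L generalizing cs with
  | nil => rfl
  | cons n L ih =>
    rw [List.foldl_cons, ih]
    simp only [pvBodyA]
    split_ifs <;> simp

-- sum of an indicator-like map over a duplicate-free list: picks the single hit
lemma pvSumSingle (L : List Int) (hnd : L.Nodup) (n0 c : Int) :
    (L.map (fun n => if n = n0 then c else 0)).sum = if n0 ∈ L then c else 0 := by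
  induction L with
  | nil => simp
  | cons a L ih =>
    rw [List.nodup_cons] at hnd
    rw [List.map_cons, List.sum_cons, ih hnd.2]
    by_cases ha : a = n0
    · subst ha
      simp [hnd.1]
    · simp [ha, Ne.symm ha, List.mem_cons]

-- a single residue-class hit over the window: the A-side sum for one target value w
lemma pvHit (m ell nmax : Int) (hm : 1 ≤ m) (w : Int) :
    ((PySem.List.pyRange (-nmax) (nmax + 1) 1).map
        (fun n => if 2 * m * n + ell = w then w else 0)).sum =
      if PySem.Int.mod (w - ell) (2 * m) = 0 ∧
          -nmax ≤ PySem.Int.floordiv (w - ell) (2 * m) ∧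
          PySem.Int.floordiv (w - ell) (2 * m) ≤ nmax
      then w else 0 := by
  have h2 : (0:Int) < 2 * m := by omega
  by_cases hmod : PySem.Int.mod (w - ell) (2 * m) = 0
  · have hd := PySem.Int.floordiv_mul_add_mod (w - ell) (2 * m)
    rw [hmod, add_zero] at hd
    set n0 := PySem.Int.floordiv (w - ell) (2 * m) with hn0
    have hfun : ∀ n : Int, (if 2 * m * n + ell = w then w else 0) =
        (if n = n0 then w else 0) := by
      intro n
      have : (2 * m * n + ell = w) ↔ n = n0 := by
        constructor
        · intro hh; nlinarith
        · intro hh; subst hh; linarith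
      by_cases hh : n = n0
      · rw [if_pos (this.mpr hh), if_pos hh]
      · rw [if_neg (fun hc => hh (this.mp hc)), if_neg hh]
    rw [List.map_congr_left (fun n _ => hfun n),
      pvSumSingle _ (PySem.List.nodup_pyRange_one (-nmax) (nmax + 1)) n0 w]
    simp only [PySem.List.mem_pyRange_one]
    by_cases hin : -nmax ≤ n0 ∧ n0 ≤ nmax
    · rw [if_pos ⟨hin.1, by omega⟩, if_pos ⟨hmod, hin.1, hin.2⟩]
    · rw [if_neg (by omega), if_neg (by tauto)]
  · rw [if_neg (by tauto)]
    apply List.sum_eq_zero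
    intro x hx
    rw [List.mem_map] at hx
    obtain ⟨n, _, hxn⟩ := hx
    by_cases hh : 2 * m * n + ell = w
    · exfalso
      apply hmod
      rw [PySem.Int.mod_eq_zero_iff_dvd]
      exact ⟨n, by linarith⟩
    · rw [if_neg hh] at hxn; exact hxn.symm

-- the A-side column sum IS Source B's per-exponent formula
lemma pvSum_eq_coeff (m ell nmax : Int) (hm : 1 ≤ m) (j : Int) (hj0 : 0 ≤ j) :
    ((PySem.List.pyRange (-nmax) (nmax + 1) 1).map (pvContrib m ell j)).sum =
      pvCoeff m ell nmax j := by
  have ht0 : 0 ≤ 4 * m * j := by positivity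
  obtain ⟨hv0, hvlo, hvhi⟩ := pvIsqrt_spec (4 * m * j) ht0
  set v := pvIsqrt (4 * m * j) with hv
  simp only [pvCoeff]
  by_cases hsq : v * v = 4 * m * j
  · rw [if_neg (by simpa using hsq)]
    by_cases hvpos : v > 0
    · -- contrib n = hit(v) n + hit(-v) n, pointwise
      have hfun : ∀ n : Int, pvContrib m ell j n =
          (if 2 * m * n + ell = v then v else 0) + (if 2 * m * n + ell = -v then -v else 0) := by
        intro n
        simp only [pvContrib]
        by_cases h1 : 2 * m * n + ell = v
        · rw [if_pos (by rw [h1]; exact hsq), if_pos h1, if_neg (by omega), h1]; ring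
        · by_cases h2 : 2 * m * n + ell = -v
          · rw [if_pos (by rw [h2]; nlinarith), if_neg h1, if_pos h2, h2]; ring
          · have hc' : ¬((2*m*n+ell)*(2*m*n+ell) = 4*m*j) := by
              intro hc
              rcases mul_self_eq_mul_self_iff.mp (hc.trans hsq.symm) with h | h
              · exact h1 h
              · exact h2 (by omega)
            rw [if_neg hc', if_neg h1, if_neg h2]
            ring
      rw [List.map_congr_left (fun n _ => hfun n), PySem.List.sum_map_add_int,
        pvHit m ell nmax hm v, pvHit m ell nmax hm (-v)]
      rw [if_pos hvpos]
      simp only [List.foldl]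
      split_ifs <;> ring
    · -- v = 0, hence 4*m*j = 0 and every contribution is 0
      have hvz : v = 0 := by omega
      have htz : 4 * m * j = 0 := by rw [← hsq, hvz]; ring
      rw [if_neg hvpos]
      have hcz : ∀ n : Int, pvContrib m ell j n = 0 := by
        intro n
        simp only [pvContrib, htz]
        split_ifs with hc
        · nlinarith
        · rfl
      rw [List.map_congr_left (fun n _ => hcz n)]
      simp only [List.foldl]
      split_ifs <;> simp
  · rw [if_pos (by simpa using hsq)]
    apply List.sum_eq_zero
    intro x hx
    rw [List.mem_map] at hx
    obtain ⟨n, _, hxn⟩ := hx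
    simp only [pvContrib] at hxn
    split_ifs at hxn with hc
    · exfalso
      -- val^2 = 4*m*j would force |val| = v, contradicting v*v ≠ 4*m*j
      set u := |2 * m * n + ell| with hu
      have hu2 : u * u = 4 * m * j := by rw [hu, abs_mul_abs_self]; exact hc
      have h1 : v ≤ u := by nlinarith [abs_nonneg (2 * m * n + ell)]
      have h2 : u ≤ v := by nlinarith [abs_nonneg (2 * m * n + ell)]
      exact hsq (by nlinarith)
    · exact hxn.symm

-- the main identity, stated over m and ell
lemma pvCore (m ell nmax : Int) :
    (PySem.List.pyRange (-nmax) (nmax + 1) 1).foldl (pvBodyA m ell nmax)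
      (List.replicate (nmax + 1).toNat 0) =
    (if m ≤ 0 ∨ nmax < 0 then (List.replicate (nmax + 1).toNat 0 : List Int)
     else (PySem.List.pyRange 0 (nmax + 1) 1).map (pvCoeff m ell nmax)) := by
  by_cases htriv : m ≤ 0 ∨ nmax < 0
  · rw [if_pos htriv]
    rcases lt_or_ge nmax 0 with hneg | hpos
    · rw [PySem.List.pyRange_one_eq_nil (by omega)]
      rfl
    · apply pvFoldlId
      intro acc x _hx
      rcases lt_or_eq_of_le (by omega : m ≤ 0) with hlt | heq
      · exact pvBodyA_neg m ell nmax hlt acc x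
      · rw [heq] at *
        exact pvBodyA_zero ell nmax acc x
  · rw [if_neg htriv]
    have hm : 1 ≤ m := by omega
    have hnm : 0 ≤ nmax := by omega
    apply List.ext_getElem?
    intro j
    by_cases hj : (j : Int) ≤ nmax
    · -- in range on both sides
      rw [pvFoldA_get m ell nmax hm _ _ j hj]
      have hjlt : j < (nmax + 1).toNat := by omega
      have hrep : (List.replicate (nmax + 1).toNat (0:Int))[j]? = some 0 := by
        rw [List.getElem?_eq_getElem (by simpa using hjlt)]
        simp
      rw [hrep]
      rw [PySem.List.pyRange_one 0 (nmax + 1)]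
      rw [List.map_map, List.getElem?_map, List.getElem?_range (by simpa using hjlt)]
      simp only [Option.map_some, Function.comp_apply, zero_add]
      rw [pvSum_eq_coeff m ell nmax hm (j:Int) (by omega)]
    · -- beyond both lengths
      rw [List.getElem?_eq_none (by rw [pvFoldA_length, List.length_replicate]; omega),
        List.getElem?_eq_none (by rw [List.length_map, PySem.List.length_pyRange_one]; omega)]

-- ===== VERDICT (by name: the statement is the Claim_ definition above) =====
theorem shadow_theta_function_spec : Claim_equal_shadow_theta_function := by
  intro p q r s nmax _hdom
  unfold Spec_shadow_theta_function
  show (PySem.List.pyRange (-nmax) (nmax + 1) 1).foldl (pvBodyA (p*q) (p*s-q*r) nmax)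
      (List.replicate (nmax + 1).toNat 0) = shadow_theta_function_alt p q r s nmax
  rw [pvCore (p*q) (p*s-q*r) nmax]
  rfl
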